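-- pv_equiv track=rewrite | github.com/simsong/python-dvs | dvs/dvs_helpers.py | check_length_is_unique_prefix
-- ===== SOURCE A (Python) =====
-- def check_length_is_unique_prefix(hexhashes:set, length:int) -> bool:
--     """Returns True if the length is sufficient to distinguish all of the hex hashes."""
--     prefixes = set()
--     for hexhash in hexhashes:
--         prefix = hexhash[0:length]
--         if prefix in prefixes:
--             return False
--         prefixes.add(prefix)
--     return True
-- ===== SOURCE B (Python) =====
-- def check_length_is_unique_prefix(hexhashes: set, length: int) -> bool:
--     """Returns True if the length is sufficient to distinguish all of the hex hashes."""
--     prefixes = sorted(h[0:length] for h in hexhashes)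
--     return all(a != b for a, b in zip(prefixes, prefixes[1:]))
-- ===== Notes on version B (the rewrite author's own statement) =====
-- stated objective: alternative
-- what changed: Replaces the incremental hash-set membership loop with early return by a sort of all prefixes followed by an adjacent-pair scan.
import Mathlib
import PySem

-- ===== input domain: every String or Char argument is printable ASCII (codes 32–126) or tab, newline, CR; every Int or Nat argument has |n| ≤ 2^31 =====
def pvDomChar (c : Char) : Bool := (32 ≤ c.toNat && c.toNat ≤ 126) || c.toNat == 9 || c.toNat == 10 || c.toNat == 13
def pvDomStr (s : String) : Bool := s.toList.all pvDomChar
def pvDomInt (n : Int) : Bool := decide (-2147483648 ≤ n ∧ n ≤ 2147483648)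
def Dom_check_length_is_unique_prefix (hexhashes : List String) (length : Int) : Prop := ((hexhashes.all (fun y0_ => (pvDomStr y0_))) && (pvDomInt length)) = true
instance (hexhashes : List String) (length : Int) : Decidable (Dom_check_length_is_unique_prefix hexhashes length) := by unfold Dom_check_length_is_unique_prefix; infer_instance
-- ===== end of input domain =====

-- B replaces A's incremental seen-set loop with early return by sorting all prefixes and
-- scanning adjacent pairs (alternative algorithm, same result).

-- ===== PORT A =====
-- the loop of A: walk the hashes, keeping the set of prefixes seen so far
def pvGoA (length : Int) : List String → PySem.Set String → Bool
  | [], _ => true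
  | h :: t, prefixes =>
    let p := PySem.Str.slice h (some 0) (some length)
    if p ∈ prefixes then false
    else pvGoA length t (PySem.Set.add prefixes p)

def check_length_is_unique_prefix (hexhashes : List String) (length : Int) : Bool :=
  pvGoA length hexhashes PySem.Set.empty

-- ===== PORT B =====
def check_length_is_unique_prefix_alt (hexhashes : List String) (length : Int) : Bool :=
  let prefixes := PySem.List.sorted (hexhashes.map (fun h => PySem.Str.slice h (some 0) (some length))) (fun x => x) false
  (prefixes.zip prefixes.tail).all (fun ab => ab.1 ≠ ab.2)

-- ===== PRECONDITION & SPEC =====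
def Spec_check_length_is_unique_prefix (hexhashes : List String) (length : Int) (out : Bool) : Prop := out = check_length_is_unique_prefix_alt hexhashes length
instance (hexhashes : List String) (length : Int) (out : Bool) : Decidable (Spec_check_length_is_unique_prefix hexhashes length out) := by unfold Spec_check_length_is_unique_prefix; infer_instance

-- ===== CLAIM (what is proved, stated in full; the proofs are below) =====
def Claim_equal_check_length_is_unique_prefix : Prop := ∀ (hexhashes : List String) (length : Int), Dom_check_length_is_unique_prefix hexhashes length → Spec_check_length_is_unique_prefix hexhashes length (check_length_is_unique_prefix hexhashes length)

-- ===== LEMMAS AND PROOFS =====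

-- A's loop succeeds iff the prefixes of the remaining hashes are pairwise distinct and avoid the seen set
theorem pvGoA_true_iff (length : Int) (xs : List String) (seen : PySem.Set String) :
    pvGoA length xs seen = true ↔
      (xs.map (fun h => PySem.Str.slice h (some 0) (some length))).Nodup ∧
      ∀ x ∈ xs, PySem.Str.slice x (some 0) (some length) ∉ seen := by
  induction xs generalizing seen with
  | nil => simp [pvGoA]
  | cons h t ih =>
    simp only [pvGoA]
    by_cases hm : PySem.Str.slice h (some 0) (some length) ∈ seen
    · rw [if_pos hm]
      simp only [Bool.false_eq_true, false_iff, not_and]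
      intro _ hall
      exact hall h (List.mem_cons_self) hm
    · rw [if_neg hm, ih]
      constructor
      · rintro ⟨hnd, hall⟩
        refine ⟨List.nodup_cons.mpr ⟨?_, hnd⟩, ?_⟩
        · intro hx
          rcases List.mem_map.mp hx with ⟨y, hy, heq⟩
          exact (hall y hy) ((PySem.Set.mem_add _ _ _).mpr (Or.inr heq))
        · intro x hx
          rcases List.mem_cons.mp hx with rfl | hxt
          · exact hm
          · intro hsx
            exact (hall x hxt) ((PySem.Set.mem_add _ _ _).mpr (Or.inl hsx))
      · rintro ⟨hndc, hall⟩
        rcases List.nodup_cons.mp hndc with ⟨hhn, hnd⟩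
        refine ⟨hnd, fun x hx hadd => ?_⟩
        rcases (PySem.Set.mem_add _ _ _).mp hadd with hsx | heq
        · exact (hall x (List.mem_cons.mpr (Or.inr hx))) hsx
        · exact hhn (List.mem_map.mpr ⟨x, hx, heq⟩)

-- the adjacent-pair scan of B is the chain of disequalities
theorem pvZipAll_iff (s : List String) :
    ((s.zip s.tail).all (fun ab => ab.1 ≠ ab.2)) = true ↔ s.IsChain (· ≠ ·) := by
  induction s with
  | nil => simp
  | cons a t ih =>
    cases t with
    | nil => simp
    | cons b u =>
      rw [List.isChain_cons_cons, ← ih]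
      simp

theorem pvIsChain_lt {s : List String} (hle : s.IsChain (· ≤ ·)) (hne : s.IsChain (· ≠ ·)) :
    s.IsChain (· < ·) := by
  induction s with
  | nil => exact List.IsChain.nil
  | cons a t ih =>
    cases t with
    | nil => exact List.IsChain.singleton a
    | cons b u =>
      rw [List.isChain_cons_cons] at hle hne ⊢
      exact ⟨lt_of_le_of_ne hle.1 hne.1, ih hle.2 hne.2⟩

-- B's adjacent scan on the sorted list decides duplicate-freeness of the prefix list
theorem pvAlt_true_iff (hexhashes : List String) (length : Int) :
    check_length_is_unique_prefix_alt hexhashes length = true ↔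
      (hexhashes.map (fun h => PySem.Str.slice h (some 0) (some length))).Nodup := by
  unfold check_length_is_unique_prefix_alt
  set ps := hexhashes.map (fun h => PySem.Str.slice h (some 0) (some length)) with hps
  set s := PySem.List.sorted ps (fun x => x) false with hs
  have hperm : s.Perm ps := PySem.List.sorted_perm ps (fun x => x) false
  have hpw : s.Pairwise (fun a b => a ≤ b) := PySem.List.sorted_pairwise ps (fun x => x)
  rw [pvZipAll_iff]
  constructor
  · intro hch
    have hlt : s.IsChain (· < ·) := pvIsChain_lt hpw.isChain hch
    have hplt : s.Pairwise (· < ·) := (List.isChain_iff_pairwise).mp hlt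
    exact hperm.nodup_iff.mp (hplt.imp ne_of_lt)
  · intro hnd
    exact ((hperm.nodup_iff.mpr hnd)).isChain

-- ===== VERDICT (by name: the statement is the Claim_ definition above) =====
theorem check_length_is_unique_prefix_spec : Claim_equal_check_length_is_unique_prefix := by
  intro hexhashes length _
  unfold Spec_check_length_is_unique_prefix
  rw [Bool.eq_iff_iff]
  unfold check_length_is_unique_prefix
  rw [pvGoA_true_iff, pvAlt_true_iff]
  simp [PySem.Set.empty]
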